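-- pv_equiv track=rewrite | github.com/LucaSforza/algoritmi2 | esercizi/es2.py | es2
-- ===== SOURCE A (Python) =====
-- def count_zero(l:list[int]) -> int:
--     result = 0
--     for i in l:
--         if i == 0:
--             result+=1
--     return result
--
-- def es2(S: list[int], k:int ) -> int:
--     #TODO il caso tutti 0 deve tornare n-1
--     n = len(S)
--     max_z_cnt = 0
--     z_cnt = 0
--     numbers = []
--     for y in reversed(range(n + 1)):
--         for x in range(n + 1):
--             if x+(n-y) > n:
--                 break
--             z_cnt += count_zero(S[:x])
--             z_cnt += count_zero(S[y:])
--             numbers.extend(S[:x])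
--             numbers.extend(S[y:])
--             if sum(numbers) <= k:
--                 if max_z_cnt < z_cnt:
--                     max_z_cnt = z_cnt
--             z_cnt = 0
--             numbers.clear()
--     return max_z_cnt
-- ===== SOURCE B (Python) =====
-- def es2(S, k):
--     n = len(S)
--     # prefix sums and prefix zero counts
--     P = [0] * (n + 1)
--     Z = [0] * (n + 1)
--     for i in range(n):
--         P[i + 1] = P[i] + S[i]
--         Z[i + 1] = Z[i] + (1 if S[i] == 0 else 0)
--     best = 0
--     for x in range(n + 1):
--         for y in range(x, n + 1):
--             if P[x] + P[n] - P[y] <= k: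
--                 z = Z[x] + Z[n] - Z[y]
--                 if z > best:
--                     best = z
--     return best
-- ===== Notes on version B (the rewrite author's own statement) =====
-- stated objective: faster
-- what changed: A re-slices, concatenates and sums the list for every (x,y) pair (O(n^3+) work); B precomputes prefix sums and prefix zero-counts once and evaluates each pair in O(1), an O(n^2) algorithm.
import Mathlib
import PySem

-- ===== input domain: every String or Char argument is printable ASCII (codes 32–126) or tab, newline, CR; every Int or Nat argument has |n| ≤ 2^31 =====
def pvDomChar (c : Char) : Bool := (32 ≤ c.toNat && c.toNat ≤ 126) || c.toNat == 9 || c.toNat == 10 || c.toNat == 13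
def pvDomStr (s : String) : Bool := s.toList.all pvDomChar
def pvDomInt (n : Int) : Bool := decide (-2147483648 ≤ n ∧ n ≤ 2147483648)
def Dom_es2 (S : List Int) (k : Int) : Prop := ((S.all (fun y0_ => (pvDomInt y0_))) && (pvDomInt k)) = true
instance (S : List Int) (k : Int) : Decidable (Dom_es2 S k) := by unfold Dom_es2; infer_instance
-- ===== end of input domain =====

-- B replaces A's O(n^3) generate-and-measure double loop (slicing, concatenating and summing
-- lists for every (x,y) pair) by precomputed prefix sums / prefix zero-counts and an O(1)
-- check per pair: asymptotically faster (O(n^2) vs O(n^3+)).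


-- ===== PORT A =====
-- count_zero: a for-loop accumulating +1 per zero element
def pvCountZero (l : List Int) : Int :=
  l.foldl (fun result i => if i = 0 then result + 1 else result) 0

-- the inner 'for x in range(n+1)' loop with its break on x+(n-y) > n
def pvInnerA (S : List Int) (k n y : Int) : List Int → Int → Int
  | [], maxz => maxz
  | x :: xs, maxz =>
    if x + (n - y) > n then maxz
    else
      let z := pvCountZero (PySem.List.slice S none (some x)) +
               pvCountZero (PySem.List.slice S (some y) none)
      let numbers := PySem.List.slice S none (some x) ++ PySem.List.slice S (some y) none
      pvInnerA S k n y xs (if numbers.sum ≤ k ∧ maxz < z then z else maxz)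

def es2 (S : List Int) (k : Int) : Int :=
  let n : Int := S.length
  ((PySem.List.pyRange 0 (n + 1) 1).reverse).foldl
    (fun maxz y => pvInnerA S k n y (PySem.List.pyRange 0 (n + 1) 1) maxz) 0

-- ===== PORT B =====
-- the building loop: P.append(P[-1] + v); Z.append(Z[-1] + (1 if v == 0 else 0))
def pvBuildPZ (S : List Int) : List Int × List Int :=
  S.foldl
    (fun PZ v =>
      (PZ.1 ++ [PySem.List.pyGetD PZ.1 (-1) 0 + v],
       PZ.2 ++ [PySem.List.pyGetD PZ.2 (-1) 0 + (if v = 0 then 1 else 0)]))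
    ([0], [0])

def es2_alt (S : List Int) (k : Int) : Int :=
  let n : Int := S.length
  let PZ := pvBuildPZ S
  let P := PZ.1
  let Z := PZ.2
  (PySem.List.pyRange 0 (n + 1) 1).foldl
    (fun best x =>
      (PySem.List.pyRange x (n + 1) 1).foldl
        (fun best y =>
          if PySem.List.pyGetD P x 0 + PySem.List.pyGetD P n 0 - PySem.List.pyGetD P y 0 ≤ k then
            let z := PySem.List.pyGetD Z x 0 + PySem.List.pyGetD Z n 0 - PySem.List.pyGetD Z y 0
            if z > best then z else best
          else best)
        best)
    0

-- ===== PRECONDITION & SPEC =====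
def Spec_es2 (S : List Int) (k : Int) (out : Int) : Prop := out = es2_alt S k
instance (S : List Int) (k : Int) (out : Int) : Decidable (Spec_es2 S k out) := by unfold Spec_es2; infer_instance

-- ===== CLAIM (what is proved, stated in full; the proofs are below) =====
def Claim_equal_es2 : Prop := ∀ (S : List Int) (k : Int), Dom_es2 S k → Spec_es2 S k (es2 S k)

-- ===== LEMMAS AND PROOFS =====

-- the common candidate value of a pair (x, y): zeros of S[:x] plus zeros of S[y:] if the
-- corresponding sum is within k, else 0 (the accumulator is then left unchanged)
def pvG (S : List Int) (k : Int) (p : Int × Int) : Int :=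
  if (S.take p.1.toNat).sum + (S.drop p.2.toNat).sum ≤ k then
    ((S.take p.1.toNat).countP (· == 0) : Int) + ((S.drop p.2.toNat).countP (· == 0) : Int)
  else 0

lemma pvG_nonneg (S : List Int) (k : Int) (p : Int × Int) : 0 ≤ pvG S k p := by
  unfold pvG; split <;> positivity

lemma pvCountZero_eq (l : List Int) : pvCountZero l = (l.countP (· == 0) : Int) := by
  unfold pvCountZero
  have := PySem.List.foldl_count_if (fun i : Int => i == 0) l 0
  simpa using this

-- a fold whose step is a max-update by a nonnegative g is a fold of max over the mapped list
lemma pvFold_step_max {α : Type} (f : Int → α → Int) (g : α → Int) :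
    ∀ (l : List α), (∀ acc x, 0 ≤ acc → x ∈ l → f acc x = max acc (g x)) →
      ∀ acc : Int, 0 ≤ acc → l.foldl f acc = (l.map g).foldl max acc := by
  intro l
  induction l with
  | nil => intro _ acc _; simp
  | cons h t ih =>
    intro hstep acc hacc
    simp only [List.foldl_cons, List.map_cons]
    rw [hstep acc h hacc (by simp)]
    exact ih (fun acc x ha hx => hstep acc x ha (by simp [hx])) _
      (le_trans hacc (le_max_left _ _))

-- a fold of max over nonnegative values keeps the accumulator nonnegative
lemma pvFoldMax_nonneg (l : List Int) (hl : ∀ x ∈ l, 0 ≤ x) :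
    ∀ a : Int, 0 ≤ a → 0 ≤ l.foldl max a := by
  induction l with
  | nil => intro a ha; exact ha
  | cons h t ih =>
    intro a ha
    exact ih (fun x hx => hl x (by simp [hx])) _ (le_trans ha (le_max_left _ _))


-- A's per-x accumulator step, written out
def pvAStep (S : List Int) (k y : Int) (maxz x : Int) : Int :=
  let z := pvCountZero (PySem.List.slice S none (some x)) +
           pvCountZero (PySem.List.slice S (some y) none)
  let numbers := PySem.List.slice S none (some x) ++ PySem.List.slice S (some y) none
  if numbers.sum ≤ k ∧ maxz < z then z else maxz

-- the inner loop of A processes exactly the x with a ≤ x < min b (y+1) (the break fires at x = y+1)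
lemma pvInnerA_range (S : List Int) (k n y : Int) :
    ∀ m (a : Int) (acc : Int), (n + 1 - a).toNat = m →
      pvInnerA S k n y (PySem.List.pyRange a (n + 1) 1) acc
        = (PySem.List.pyRange a (min (n + 1) (y + 1)) 1).foldl (pvAStep S k y) acc := by
  intro m
  induction m with
  | zero =>
    intro a acc h
    rw [PySem.List.pyRange_one_eq_nil (by omega), PySem.List.pyRange_one_eq_nil (by omega)]
    rfl
  | succ m ih =>
    intro a acc h
    rw [PySem.List.pyRange_one_cons (by omega)]
    by_cases hy : a + (n - y) > n
    · have : min (n + 1) (y + 1) ≤ a := by omega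
      rw [PySem.List.pyRange_one_eq_nil this]
      simp [pvInnerA, hy]
    · rw [PySem.List.pyRange_one_cons (by omega : a < min (n + 1) (y + 1))]
      simp only [List.foldl_cons]
      rw [show pvInnerA S k n y (a :: PySem.List.pyRange (a+1) (n+1) 1) acc
            = pvInnerA S k n y (PySem.List.pyRange (a+1) (n+1) 1) (pvAStep S k y acc a) by
          simp [pvInnerA, hy, pvAStep]]
      exact ih (a+1) _ (by omega)

-- evaluating A's step through the slice/count lemmas: it is a max-update by pvG
lemma pvAStep_eq (S : List Int) (k y : Int) (hy : 0 ≤ y) (x : Int) (hx : 0 ≤ x)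
    (acc : Int) (hacc : 0 ≤ acc) :
    pvAStep S k y acc x = max acc (pvG S k (x, y)) := by
  simp only [pvAStep, pvG, PySem.List.slice_to S hx, PySem.List.slice_from S hy,
    List.sum_append, pvCountZero_eq]
  split_ifs with h1 h2 h3 <;> simp at * <;> omega

-- A's whole outer loop, rewritten as one fold of max over the flattened pair list
lemma pvOuterA (S : List Int) (k n : Int) :
    ∀ (ys : List Int) (acc : Int), 0 ≤ acc → (∀ y ∈ ys, 0 ≤ y ∧ y ≤ n) →
      ys.foldl (fun maxz y => pvInnerA S k n y (PySem.List.pyRange 0 (n + 1) 1) maxz) acc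
        = ((ys.flatMap (fun y => (PySem.List.pyRange 0 (y + 1) 1).map (fun x => (x, y)))).map
            (pvG S k)).foldl max acc := by
  intro ys
  induction ys with
  | nil => intro acc _ _; rfl
  | cons y t ih =>
    intro acc hacc hmem
    obtain ⟨hy0, hyn⟩ := hmem y (by simp)
    simp only [List.foldl_cons, List.flatMap_cons, List.map_append, List.foldl_append]
    rw [pvInnerA_range S k n y (n + 1 - 0).toNat 0 acc rfl,
        show min (n + 1) (y + 1) = y + 1 by omega]
    rw [pvFold_step_max (pvAStep S k y) (fun x => pvG S k (x, y)) _
          (fun acc x ha hx => pvAStep_eq S k y hy0 x (PySem.List.mem_pyRange_one.mp hx).1 acc ha)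
          acc hacc]
    rw [show (PySem.List.pyRange 0 (y+1) 1).map (fun x => pvG S k (x, y))
          = ((PySem.List.pyRange 0 (y+1) 1).map (fun x => (x, y))).map (pvG S k) by
        simp [List.map_map, Function.comp_def]]
    exact ih _
      (pvFoldMax_nonneg _ (by
        intro v hv
        simp only [List.mem_map] at hv
        obtain ⟨p, _, rfl⟩ := hv
        exact pvG_nonneg S k p) acc hacc)
      (fun y hy => hmem y (by simp [hy]))

-- ---- B side ----
def pvZ01 (v : Int) : Int := if v = 0 then 1 else 0

-- the running values appended by B's building loop, starting from accumulated value c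
def pvPartials (f : Int → Int) : Int → List Int → List Int
  | _, [] => []
  | c, v :: t => (c + f v) :: pvPartials f (c + f v) t

lemma pvBuild_one (f : Int → Int) :
    ∀ (S : List Int) (acc : List Int) (c : Int),
      S.foldl (fun P v => P ++ [PySem.List.pyGetD P (-1) 0 + f v]) (acc ++ [c])
        = (acc ++ [c]) ++ pvPartials f c S := by
  intro S
  induction S with
  | nil => intro acc c; simp [pvPartials]
  | cons v t ih =>
    intro acc c
    simp only [List.foldl_cons, PySem.List.pyGetD_neg_one_append_singleton, pvPartials]
    rw [show acc ++ [c] ++ [c + f v] = (acc ++ [c]) ++ [c + f v] from rfl, ih (acc ++ [c]) (c + f v)]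
    simp

lemma pvBuildPZ_eq (S : List Int) :
    pvBuildPZ S = ([0] ++ pvPartials id 0 S, [0] ++ pvPartials pvZ01 0 S) := by
  unfold pvBuildPZ
  rw [PySem.List.foldl_prod_mk
        (fun P v => P ++ [PySem.List.pyGetD P (-1) 0 + v])
        (fun Z v => Z ++ [PySem.List.pyGetD Z (-1) 0 + (if v = 0 then 1 else 0)]) S [0] [0]]
  rw [show ([0] : List Int) = [] ++ [0] from rfl]
  have h1 := pvBuild_one id S [] 0
  have h2 := pvBuild_one pvZ01 S [] 0
  simp only [id_eq, pvZ01, List.nil_append] at h1 h2 ⊢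
  rw [h1, h2]

lemma pvPartials_getD (f : Int → Int) :
    ∀ (S : List Int) (c : Int) (j : Nat), j < S.length →
      (pvPartials f c S).getD j 0 = c + ((S.take (j + 1)).map f).sum := by
  intro S
  induction S with
  | nil => intro c j h; simp at h
  | cons v t ih =>
    intro c j h
    cases j with
    | zero => simp [pvPartials]
    | succ j =>
      simp only [pvPartials, List.getD_cons_succ, List.take_succ_cons, List.map_cons,
        List.sum_cons]
      rw [ih (c + f v) j (by simpa using h)]
      ring

-- indexing the built prefix list at i ≤ len S yields the fold of f over S[:i]
lemma pvPrefix_getD (f : Int → Int) (S : List Int) (i : Nat) (hi : i ≤ S.length) :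
    (([0] ++ pvPartials f 0 S : List Int)).getD i 0 = ((S.take i).map f).sum := by
  cases i with
  | zero => simp
  | succ j =>
    simp only [List.cons_append, List.nil_append, List.getD_cons_succ]
    rw [pvPartials_getD f S 0 j (by omega)]
    simp

-- B's per-y step is the same max-update by pvG
lemma pvBStep_eq (S : List Int) (k : Int) (x y : Int) (hx : 0 ≤ x) (hxy : x ≤ y)
    (hy : y ≤ (S.length : Int)) (acc : Int) (hacc : 0 ≤ acc) :
    (if PySem.List.pyGetD ([0] ++ pvPartials id 0 S) x 0
          + PySem.List.pyGetD ([0] ++ pvPartials id 0 S) (S.length : Int) 0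
          - PySem.List.pyGetD ([0] ++ pvPartials id 0 S) y 0 ≤ k then
        let z := PySem.List.pyGetD ([0] ++ pvPartials pvZ01 0 S) x 0
          + PySem.List.pyGetD ([0] ++ pvPartials pvZ01 0 S) (S.length : Int) 0
          - PySem.List.pyGetD ([0] ++ pvPartials pvZ01 0 S) y 0
        if z > acc then z else acc
      else acc)
      = max acc (pvG S k (x, y)) := by
  have hx' : x = ((x.toNat : Nat) : Int) := by omega
  have hy' : y = ((y.toNat : Nat) : Int) := by omega
  rw [hx', hy'] at *
  simp only [PySem.List.pyGetD_natCast]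
  rw [pvPrefix_getD id S x.toNat (by omega), pvPrefix_getD id S y.toNat (by omega),
      pvPrefix_getD id S S.length (by omega),
      pvPrefix_getD pvZ01 S x.toNat (by omega), pvPrefix_getD pvZ01 S y.toNat (by omega),
      pvPrefix_getD pvZ01 S S.length (by omega)]
  have hz : ∀ l : List Int, ((l.map pvZ01).sum) = (l.countP (· == 0) : Int) := by
    intro l
    rw [show (pvZ01 : Int → Int) = fun v => if (v == 0) = true then 1 else 0 by
      funext v; simp [pvZ01]]
    exact PySem.List.sum_map_ite_one_zero (fun v : Int => v == 0) l
  have hsum : (S.take y.toNat).sum + (S.drop y.toNat).sum = S.sum :=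
    List.sum_take_add_sum_drop S y.toNat
  have hcnt : ((S.take y.toNat).countP (· == 0) : Int) + ((S.drop y.toNat).countP (· == 0) : Int)
      = (S.countP (· == 0) : Int) := by
    have : (S.take y.toNat ++ S.drop y.toNat).countP (· == 0) = S.countP (· == 0) := by
      rw [List.take_append_drop]
    rw [List.countP_append] at this
    exact_mod_cast this
  simp only [List.map_id, List.take_length, hz, pvG, Int.toNat_natCast]
  split_ifs with h1 h2 h3 <;> omega

-- B's whole double loop as one fold of max over its flattened pair list
lemma pvOuterB (S : List Int) (k n : Int) (hn : n = (S.length : Int)) :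
    ∀ (xs : List Int) (acc : Int), 0 ≤ acc → (∀ x ∈ xs, 0 ≤ x ∧ x ≤ n) →
      xs.foldl
        (fun best x =>
          (PySem.List.pyRange x (n + 1) 1).foldl
            (fun best y =>
              if PySem.List.pyGetD ([0] ++ pvPartials id 0 S) x 0
                    + PySem.List.pyGetD ([0] ++ pvPartials id 0 S) n 0
                    - PySem.List.pyGetD ([0] ++ pvPartials id 0 S) y 0 ≤ k then
                let z := PySem.List.pyGetD ([0] ++ pvPartials pvZ01 0 S) x 0
                    + PySem.List.pyGetD ([0] ++ pvPartials pvZ01 0 S) n 0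
                    - PySem.List.pyGetD ([0] ++ pvPartials pvZ01 0 S) y 0
                if z > best then z else best
              else best)
            best)
        acc
      = ((xs.flatMap (fun x => (PySem.List.pyRange x (n + 1) 1).map (fun y => (x, y)))).map
          (pvG S k)).foldl max acc := by
  intro xs
  induction xs with
  | nil => intro acc _ _; rfl
  | cons x t ih =>
    intro acc hacc hmem
    obtain ⟨hx0, hxn⟩ := hmem x (by simp)
    simp only [List.foldl_cons, List.flatMap_cons, List.map_append, List.foldl_append]
    rw [pvFold_step_max _ (fun y => pvG S k (x, y)) _
          (fun acc y ha hy => by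
            obtain ⟨hxy, hyn⟩ := PySem.List.mem_pyRange_one.mp hy
            subst hn
            exact pvBStep_eq S k x y hx0 hxy (by omega) acc ha)
          acc hacc]
    rw [show (PySem.List.pyRange x (n+1) 1).map (fun y => pvG S k (x, y))
          = ((PySem.List.pyRange x (n+1) 1).map (fun y => (x, y))).map (pvG S k) by
        simp [List.map_map, Function.comp_def]]
    exact ih _
      (pvFoldMax_nonneg _ (by
        intro v hv
        simp only [List.mem_map] at hv
        obtain ⟨p, _, rfl⟩ := hv
        exact pvG_nonneg S k p) acc hacc)
      (fun x hx => hmem x (by simp [hx]))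

-- ---- the two pair enumerations are permutations of each other ----
def pvLA (n : Int) : List (Int × Int) :=
  ((PySem.List.pyRange 0 (n + 1) 1).reverse).flatMap
    (fun y => (PySem.List.pyRange 0 (y + 1) 1).map (fun x => (x, y)))

def pvLB (n : Int) : List (Int × Int) :=
  (PySem.List.pyRange 0 (n + 1) 1).flatMap
    (fun x => (PySem.List.pyRange x (n + 1) 1).map (fun y => (x, y)))

lemma pvMem_LA (n : Int) (p : Int × Int) :
    p ∈ pvLA n ↔ 0 ≤ p.1 ∧ p.1 ≤ p.2 ∧ p.2 ≤ n := by
  obtain ⟨x, y⟩ := p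
  simp only [pvLA, List.mem_flatMap, List.mem_reverse, List.mem_map,
    PySem.List.mem_pyRange_one, Prod.mk.injEq]
  constructor
  · rintro ⟨y', ⟨hy1, hy2⟩, x', ⟨hx1, hx2⟩, rfl, rfl⟩; omega
  · rintro ⟨h1, h2, h3⟩; exact ⟨y, by omega, x, by omega, rfl, rfl⟩

lemma pvMem_LB (n : Int) (p : Int × Int) :
    p ∈ pvLB n ↔ 0 ≤ p.1 ∧ p.1 ≤ p.2 ∧ p.2 ≤ n := by
  obtain ⟨x, y⟩ := p
  simp only [pvLB, List.mem_flatMap, List.mem_map, PySem.List.mem_pyRange_one, Prod.mk.injEq]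
  constructor
  · rintro ⟨x', ⟨hx1, hx2⟩, y', ⟨hy1, hy2⟩, rfl, rfl⟩; omega
  · rintro ⟨h1, h2, h3⟩; exact ⟨x, by omega, y, by omega, rfl, rfl⟩

lemma pvNodup_LA (n : Int) : (pvLA n).Nodup := by
  rw [pvLA, List.nodup_flatMap]
  refine ⟨fun y _ => (PySem.List.nodup_pyRange_one 0 (y + 1)).map
      (fun a b h => by simpa using h), ?_⟩
  rw [List.pairwise_reverse]
  refine (PySem.List.pairwise_lt_pyRange_one 0 (n + 1)).imp ?_
  intro y y' hyy p hp hp'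
  simp only [List.mem_map] at hp hp'
  obtain ⟨a, _, rfl⟩ := hp
  obtain ⟨b, _, hb⟩ := hp'
  exact absurd (congrArg Prod.snd hb).symm (by simp; omega)

lemma pvNodup_LB (n : Int) : (pvLB n).Nodup := by
  rw [pvLB, List.nodup_flatMap]
  refine ⟨fun x _ => (PySem.List.nodup_pyRange_one x (n + 1)).map
      (fun a b h => by simpa using h), ?_⟩
  refine (PySem.List.pairwise_lt_pyRange_one 0 (n + 1)).imp ?_
  intro x x' hxx p hp hp'
  simp only [List.mem_map] at hp hp'
  obtain ⟨a, _, rfl⟩ := hp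
  obtain ⟨b, _, hb⟩ := hp'
  exact absurd (congrArg Prod.fst hb).symm (by simp; omega)

lemma pvPerm_LA_LB (n : Int) : (pvLA n).Perm (pvLB n) :=
  (List.perm_ext_iff_of_nodup (pvNodup_LA n) (pvNodup_LB n)).mpr
    (fun p => by rw [pvMem_LA, pvMem_LB])

-- ===== VERDICT (by name: the statement is the Claim_ definition above) =====
theorem es2_spec : Claim_equal_es2 := by
  intro S k _
  unfold Spec_es2 es2 es2_alt
  simp only [pvBuildPZ_eq]
  rw [pvOuterA S k (S.length : Int) ((PySem.List.pyRange 0 ((S.length : Int) + 1) 1).reverse) 0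
        le_rfl
        (fun y hy => by
          rw [List.mem_reverse, PySem.List.mem_pyRange_one] at hy; omega),
      pvOuterB S k (S.length : Int) rfl (PySem.List.pyRange 0 ((S.length : Int) + 1) 1) 0
        le_rfl
        (fun x hx => by rw [PySem.List.mem_pyRange_one] at hx; omega)]
  exact ((pvPerm_LA_LB (S.length : Int)).map (pvG S k)).foldl_eq 0
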